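-- pv_equiv track=rewrite | github.com/sproutsai-engg/coding_question_generator | json_files/python_codes/Q_660.py | newInteger
-- ===== SOURCE A (Python) =====
-- def newInteger(n):
--     result = 0
--     base = 1
--     while n:
--         result += n % 9 * base
--         n //= 9
--         base *= 10
--     return result
-- ===== SOURCE B (Python) =====
-- def newInteger(n):
--     # Reading the base-9 digits of n as a decimal numeral equals
--     #   n + sum_{k>=1} (n // 9**k) * 10**(k-1)
--     # (the digit sum telescopes: d_k = n//9**k - 9*(n//9**(k+1))).
--     # So sum prefix quotients scaled by powers, never extracting a digit.
--     result = n
--     p9, p10 = 9, 1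
--     while p9 <= n:
--         result += n // p9 * p10
--         p9 *= 9
--         p10 *= 10
--     return result
-- ===== Notes on version B (the rewrite author's own statement) =====
-- stated objective: alternative
-- what changed: B never extracts a base-9 digit (no n%9, no mutation of n): it uses the telescoping identity result = n + sum_{k>=1} (n//9^k)*10^(k-1), iterating over powers 9^k and adding whole prefix quotients; A peels digits off n with %/// and a running power-of-ten accumulator.
import Mathlib
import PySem

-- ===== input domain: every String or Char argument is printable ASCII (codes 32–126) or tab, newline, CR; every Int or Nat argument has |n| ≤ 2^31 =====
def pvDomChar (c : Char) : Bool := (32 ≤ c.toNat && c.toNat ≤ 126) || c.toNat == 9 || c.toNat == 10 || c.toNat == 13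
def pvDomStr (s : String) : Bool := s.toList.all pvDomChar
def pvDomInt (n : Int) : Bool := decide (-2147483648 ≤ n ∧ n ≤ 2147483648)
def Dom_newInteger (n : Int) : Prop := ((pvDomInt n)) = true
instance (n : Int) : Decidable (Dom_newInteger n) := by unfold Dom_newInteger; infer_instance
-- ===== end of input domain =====

-- B replaces digit extraction by the telescoping identity n + Σ_{k≥1} (n//9^k)·10^(k-1),
-- iterating over powers of 9; equivalent to A on n ≥ 0, same cost (objective: alternative).

-- Termination fact for A's 'while n:' loop (for n < 0 Python diverges; excluded by Pre_).
theorem pvFloordiv9_lt (n : Int) (h : ¬ n ≤ 0) : (PySem.Int.floordiv n 9).toNat < n.toNat := by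
  rw [PySem.Int.floordiv_eq_ediv_of_pos (by omega)]
  omega

-- ===== PORT A =====
-- A's while-loop; 'if n ≤ 0' is a totality guard: Python exits at n = 0 and diverges for n < 0 (outside Pre_).
def newIntegerLoopA (n result base : Int) : Int :=
  if h : n ≤ 0 then result
  else newIntegerLoopA (PySem.Int.floordiv n 9) (result + PySem.Int.mod n 9 * base) (base * 10)
termination_by n.toNat
decreasing_by exact pvFloordiv9_lt n h

def newInteger (n : Int) : Int := newIntegerLoopA n 0 1

-- ===== PORT B =====
-- Source B's 'while p9 <= n:' loop; the '0 < p9' conjunct is a totality guard only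
-- (every call has p9 a positive power of 9, so it never alters the computation).
def newIntegerLoopB (n p9 p10 result : Int) : Int :=
  if _h : p9 ≤ n ∧ 0 < p9 then
    newIntegerLoopB n (p9 * 9) (p10 * 10) (result + PySem.Int.floordiv n p9 * p10)
  else result
termination_by (n + 1 - p9).toNat
decreasing_by omega

def newInteger_alt (n : Int) : Int := newIntegerLoopB n 9 1 n

-- ===== PRECONDITION & SPEC =====
-- Pre_ excludes n < 0, where Python A's 'while n:' loop never terminates (n //= 9 stabilises at -1).
def Pre_newInteger (n : Int) : Prop := 0 ≤ n
instance (n : Int) : Decidable (Pre_newInteger n) := by unfold Pre_newInteger; infer_instance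
def pvWitness_newInteger : Int := (17)

def Spec_newInteger (n : Int) (out : Int) : Prop := out = newInteger_alt n
instance (n : Int) (out : Int) : Decidable (Spec_newInteger n out) := by unfold Spec_newInteger; infer_instance

-- ===== CLAIM (what is proved, stated in full; the proofs are below) =====
def Claim_equal_newInteger : Prop := ∀ (n : Int), Dom_newInteger n → Pre_newInteger n → Spec_newInteger n (newInteger n)

-- ===== LEMMAS AND PROOFS =====

-- The base-9-digits-read-as-decimal value, A's way (recursive characterisation of A's loop).
def pvG (n : Int) : Int :=
  if h : n ≤ 0 then 0
  else 10 * pvG (PySem.Int.floordiv n 9) + PySem.Int.mod n 9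
termination_by n.toNat
decreasing_by exact pvFloordiv9_lt n h

-- The prefix-quotient sum B accumulates: pvT m = Σ_j (m / 9^j) · 10^j (m the current quotient).
def pvT (m : Int) : Int :=
  if h : m ≤ 0 then 0
  else m + 10 * pvT (PySem.Int.floordiv m 9)
termination_by m.toNat
decreasing_by exact pvFloordiv9_lt m h

theorem loopA_eq (n result base : Int) :
    newIntegerLoopA n result base = result + base * pvG n := by
  by_cases h : n ≤ 0
  · simp [newIntegerLoopA, pvG, h]
  · rw [newIntegerLoopA, pvG]
    simp only [h, dite_false]
    rw [loopA_eq]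
    ring
termination_by n.toNat
decreasing_by exact pvFloordiv9_lt n h

theorem fdiv_fdiv (n a : Int) (_hn : 0 ≤ n) (ha : 0 < a) :
    PySem.Int.floordiv (PySem.Int.floordiv n a) 9 = PySem.Int.floordiv n (a * 9) := by
  rw [PySem.Int.floordiv_eq_ediv_of_pos ha, PySem.Int.floordiv_eq_ediv_of_pos (by omega),
      PySem.Int.floordiv_eq_ediv_of_pos (by positivity), Int.ediv_ediv_of_nonneg (by omega)]

theorem loopB_eq (n p9 p10 result : Int) (hn : 0 ≤ n) (hp : 0 < p9) :
    newIntegerLoopB n p9 p10 result = result + p10 * pvT (PySem.Int.floordiv n p9) := by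
  by_cases h : p9 ≤ n
  · rw [newIntegerLoopB]
    simp only [h, hp, and_true, dite_true]
    rw [loopB_eq n (p9 * 9) (p10 * 10) _ hn (by omega)]
    have hq : ¬ PySem.Int.floordiv n p9 ≤ 0 := by
      rw [PySem.Int.floordiv_eq_ediv_of_pos hp]
      have := Int.le_ediv_iff_mul_le (a := 1) (b := n) hp
      omega
    conv_rhs => rw [pvT]
    rw [dif_neg hq, fdiv_fdiv n p9 hn hp]
    ring
  · rw [newIntegerLoopB]
    simp only [h, false_and, dite_false]
    have h0 : PySem.Int.floordiv n p9 = 0 := by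
      rw [PySem.Int.floordiv_eq_ediv_of_pos hp]
      exact Int.ediv_eq_zero_of_lt hn (by omega)
    rw [h0, pvT]
    simp
termination_by (n + 1 - p9).toNat
decreasing_by omega

-- The bridge: the digit value equals n plus the prefix-quotient sum from 9¹ on.
theorem pvG_eq (n : Int) (hn : 0 ≤ n) :
    pvG n = n + pvT (PySem.Int.floordiv n 9) := by
  by_cases h : n ≤ 0
  · have : n = 0 := by omega
    subst this
    simp [pvG, pvT, PySem.Int.floordiv]
  · rw [pvG, dif_neg h]
    have hq0 : 0 ≤ PySem.Int.floordiv n 9 := by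
      rw [PySem.Int.floordiv_eq_ediv_of_pos (by omega)]; omega
    rw [pvG_eq (PySem.Int.floordiv n 9) hq0]
    have hmod : PySem.Int.mod n 9 = n % 9 := PySem.Int.mod_eq_emod_of_pos (by omega)
    have hdiv : PySem.Int.floordiv n 9 = n / 9 := PySem.Int.floordiv_eq_ediv_of_pos (by omega)
    by_cases hq : PySem.Int.floordiv n 9 ≤ 0
    · have q0 : PySem.Int.floordiv n 9 = 0 := by omega
      have f0 : PySem.Int.floordiv 0 9 = 0 := by
        rw [PySem.Int.floordiv_eq_ediv_of_pos (by omega)]; simp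
      have t0 : pvT 0 = 0 := by rw [pvT]; simp
      rw [q0, f0, t0]
      rw [q0] at hdiv
      rw [hmod]
      omega
    · conv_rhs => rw [pvT]
      rw [dif_neg hq]
      rw [hmod, hdiv] at *
      omega
termination_by n.toNat
decreasing_by exact pvFloordiv9_lt n h

-- ===== VERDICT (by name: the statement is the Claim_ definition above) =====
theorem newInteger_spec : Claim_equal_newInteger := by
  intro n _ hpre
  unfold Spec_newInteger newInteger newInteger_alt
  rw [loopA_eq, loopB_eq n 9 1 n hpre (by omega), pvG_eq n hpre]
  ring
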